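-- pv_equiv track=rewrite | github.com/imedox/crimsonforge | core/audio_index.py | _iter_paloc_key_candidates
-- ===== SOURCE A (Python) =====
-- def _iter_paloc_key_candidates(paloc_key: str) -> list[str]:
--     """Generate safe lookup aliases for audio-driven paloc keys."""
--     key = (paloc_key or "").strip().lower()
--     if not key:
--         return []
--
--     seen: set[str] = set()
--     result: list[str] = []
--
--     def add(value: str):
--         value = (value or "").strip().lower()
--         if value and value not in seen:
--             seen.add(value)
--             result.append(value)
--
--     add(key)
--     add(key.replace("__", "_"))
--
--     prefix_aliases = {
--         "faction_": ("factiondialog_", "factionnode_"),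
--         "npcvoice_": ("npcdialog_", "textdialog_"),
--         "npcdialog_": ("npcvoice_", "textdialog_"),
--         "textdialog_": ("npcvoice_", "npcdialog_"),
--         "general_": ("aidialogstringinfo_general_",),
--     }
--     for prefix, aliases in prefix_aliases.items():
--         if key.startswith(prefix):
--             suffix = key[len(prefix):]
--             for alias in aliases:
--                 add(f"{alias}{suffix}")
--
--     return result
-- ===== SOURCE B (Python) =====
-- def _iter_paloc_key_candidates(paloc_key: str) -> list[str]:
--     """Generate safe lookup aliases for audio-driven paloc keys."""
--     key = (paloc_key or "").strip().lower()
--     if not key: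
--         return []
--
--     # Every alias rule is keyed by the key's first underscore-terminated
--     # segment, so instead of scanning prefixes with startswith we split the
--     # key once at its first '_' and do a single dict lookup.
--     prefix_aliases = {
--         "faction_": ("factiondialog_", "factionnode_"),
--         "npcvoice_": ("npcdialog_", "textdialog_"),
--         "npcdialog_": ("npcvoice_", "textdialog_"),
--         "textdialog_": ("npcvoice_", "npcdialog_"),
--         "general_": ("aidialogstringinfo_general_",),
--     }
--     head, sep, tail = key.partition("_")
--     aliases = prefix_aliases.get(head + sep, ())
--
--     candidates = [key, key.replace("__", "_")]
--     candidates += [alias + tail for alias in aliases]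
--
--     # normalize, drop empties, dedup keeping first occurrences
--     normalized = [v for v in (c.strip().lower() for c in candidates) if v]
--     return list(dict.fromkeys(normalized))
-- ===== Notes on version B (the rewrite author's own statement) =====
-- stated objective: alternative
-- what changed: B replaces A's startswith scan over the alias table and its mutating add()/seen-set with a single dict lookup keyed by the key's first underscore-terminated segment (via str.partition), then one staged normalize/filter/dedup pass via dict.fromkeys.
import Mathlib
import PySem

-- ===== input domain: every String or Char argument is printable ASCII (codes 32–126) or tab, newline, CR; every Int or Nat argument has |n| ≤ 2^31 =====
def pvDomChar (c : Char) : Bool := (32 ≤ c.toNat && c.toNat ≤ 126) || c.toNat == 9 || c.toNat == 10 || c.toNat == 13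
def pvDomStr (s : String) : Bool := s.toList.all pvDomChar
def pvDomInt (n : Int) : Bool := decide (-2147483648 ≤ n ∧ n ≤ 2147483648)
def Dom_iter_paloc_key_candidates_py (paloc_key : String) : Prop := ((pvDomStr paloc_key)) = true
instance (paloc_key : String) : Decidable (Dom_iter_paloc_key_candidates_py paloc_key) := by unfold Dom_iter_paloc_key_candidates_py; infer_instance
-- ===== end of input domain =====

-- B replaces A's startswith scan over the alias table and its mutating add()/seen-set with a
-- single lookup keyed by the key's first underscore-terminated segment (via str.partition)
-- followed by one staged normalize/filter/dedup pass (objective: alternative).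

-- the alias table (A's dict literal / B's dict literal, same insertion order)
def pvPrefixAliases : List (String × List String) :=
  [("faction_", ["factiondialog_", "factionnode_"]),
   ("npcvoice_", ["npcdialog_", "textdialog_"]),
   ("npcdialog_", ["npcvoice_", "textdialog_"]),
   ("textdialog_", ["npcvoice_", "npcdialog_"]),
   ("general_", ["aidialogstringinfo_general_"])]

-- ===== PORT A =====
-- the nested 'add' helper: state = (seen : set, result : list)
def pvAddA (st : PySem.Set String × List String) (value : String) : PySem.Set String × List String :=
  let v := PySem.Str.lower (PySem.Str.strip value)
  if v ≠ "" ∧ ¬ PySem.Set.contains st.1 v then (PySem.Set.add st.1 v, st.2 ++ [v]) else st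

def iter_paloc_key_candidates_py (paloc_key : String) : List String :=
  let key := PySem.Str.lower (PySem.Str.strip paloc_key)
  if key = "" then []
  else
    let st : PySem.Set String × List String := ([], [])
    let st := pvAddA st key
    let st := pvAddA st (PySem.Str.replace key "__" "_")
    let st := pvPrefixAliases.foldl (fun st pa =>
      if PySem.Str.startswith key pa.1 then
        -- suffix = key[len(prefix):] : dropping the prefix's characters is exact for a nonnegative slice start
        let suffix := key.toList.drop pa.1.toList.length
        -- f"{alias}{suffix}" : string concatenation, exact as list append
        pa.2.foldl (fun st al => pvAddA st (String.ofList (al.toList ++ suffix))) st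
      else st) st
    st.2

-- ===== PORT B =====
def iter_paloc_key_candidates_py_alt (paloc_key : String) : List String :=
  let key := PySem.Str.lower (PySem.Str.strip paloc_key)
  if key = "" then []
  else
    -- head, sep, tail = key.partition("_") : split at the FIRST '_' (span on the char list; exact for a 1-char separator)
    let head := key.toList.takeWhile (fun c => (c ≠ '_' : Bool))
    let rest := key.toList.dropWhile (fun c => (c ≠ '_' : Bool))
    let sep : List Char := if rest = [] then [] else ['_']
    let tail : List Char := if rest = [] then [] else rest.tail
    -- aliases = prefix_aliases.get(head + sep, ())
    let aliases := (List.lookup (String.ofList (head ++ sep)) pvPrefixAliases).getD []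
    -- candidates = [key, collapsed] + [alias + tail for alias in aliases]
    let candidates := [key, PySem.Str.replace key "__" "_"] ++
      aliases.map (fun al => String.ofList (al.toList ++ tail))
    -- normalize, drop empties, dedup keeping first occurrences (dict.fromkeys)
    PySem.List.dedup
      ((candidates.map (fun c => PySem.Str.lower (PySem.Str.strip c))).filter (fun v => decide (v ≠ "")))

-- ===== PRECONDITION & SPEC =====
def Spec_iter_paloc_key_candidates_py (paloc_key : String) (out : List String) : Prop := out = iter_paloc_key_candidates_py_alt paloc_key
instance (paloc_key : String) (out : List String) : Decidable (Spec_iter_paloc_key_candidates_py paloc_key out) := by unfold Spec_iter_paloc_key_candidates_py; infer_instance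

-- ===== CLAIM (what is proved, stated in full; the proofs are below) =====
def Claim_equal_iter_paloc_key_candidates_py : Prop := ∀ (paloc_key : String), Dom_iter_paloc_key_candidates_py paloc_key → Spec_iter_paloc_key_candidates_py paloc_key (iter_paloc_key_candidates_py paloc_key)

-- ===== LEMMAS AND PROOFS =====

-- B's partition data, abbreviated for the proofs: the first underscore-terminated segment and what follows it
def pvSeg (L : List Char) : List Char :=
  L.takeWhile (fun c => (c ≠ '_' : Bool)) ++ (if L.dropWhile (fun c => (c ≠ '_' : Bool)) = [] then [] else ['_'])
def pvTail (L : List Char) : List Char :=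
  if L.dropWhile (fun c => (c ≠ '_' : Bool)) = [] then [] else (L.dropWhile (fun c => (c ≠ '_' : Bool))).tail

-- span of (· ≠ '_') across a list whose first '_' is explicit
lemma pvSpan (q s : List Char) (hq : '_' ∉ q) :
    (q ++ '_' :: s).takeWhile (fun c => (c ≠ '_' : Bool)) = q ∧
    (q ++ '_' :: s).dropWhile (fun c => (c ≠ '_' : Bool)) = '_' :: s := by
  induction q with
  | nil => simp
  | cons c q ih =>
    have hc : c ≠ '_' := fun h => hq (h ▸ List.mem_cons_self)
    have h2 := ih (fun h => hq (List.mem_cons_of_mem _ h))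
    simp only [ne_eq, decide_not] at h2 ⊢
    simp only [List.cons_append, List.takeWhile_cons, List.dropWhile_cons]
    simp [hc, h2.1, h2.2]

-- inversion: if the segment is q ++ ['_'] then the key splits as q ++ '_' :: tail
lemma pvSeg_elim (L q : List Char) (hseg : pvSeg L = q ++ ['_']) :
    L = q ++ '_' :: pvTail L := by
  by_cases hr : L.dropWhile (fun c => (c ≠ '_' : Bool)) = []
  · exfalso
    unfold pvSeg at hseg
    rw [if_pos hr, List.append_nil] at hseg
    have hm : '_' ∈ L.takeWhile (fun c => (c ≠ '_' : Bool)) := by rw [hseg]; simp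
    have := List.mem_takeWhile_imp hm
    simp at this
  · unfold pvSeg at hseg
    rw [if_neg hr] at hseg
    have htw : L.takeWhile (fun c => (c ≠ '_' : Bool)) = q := by
      exact List.append_inj_left' hseg rfl
    obtain ⟨c, r', hr'⟩ := List.exists_cons_of_ne_nil hr
    have hc : (fun c => (c ≠ '_' : Bool)) c = false := by
      have h2 := List.head_dropWhile_not (fun c => (c ≠ '_' : Bool)) (l := L) (by rw [hr']; exact List.cons_ne_nil c r')
      simp only [hr', List.head_cons] at h2
      simpa using h2
    have hcu : c = '_' := by simpa using hc
    calc L = L.takeWhile (fun c => (c ≠ '_' : Bool)) ++ L.dropWhile (fun c => (c ≠ '_' : Bool)) :=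
            (List.takeWhile_append_dropWhile).symm
      _ = q ++ '_' :: pvTail L := by rw [htw, hr', hcu]; unfold pvTail; rw [hr']; simp

-- A's startswith test, expressed through B's partition segment
lemma pvStartswith_eq (key p : String) (q : List Char) (hp : p.toList = q ++ ['_']) (hq : '_' ∉ q) :
    PySem.Str.startswith key p = decide (pvSeg key.toList = q ++ ['_']) := by
  rw [Bool.eq_iff_iff]
  simp only [PySem.Str.startswith_eq, hp, decide_eq_true_eq]
  rw [PySem.Chars.startswith_iff]
  constructor
  · rintro ⟨t, ht⟩
    have hL : key.toList = q ++ '_' :: t := by rw [← ht]; simp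
    have hs := pvSpan q t hq
    unfold pvSeg
    rw [hL, hs.1, hs.2]
    simp
  · intro hseg
    refine ⟨pvTail key.toList, ?_⟩
    rw [List.append_assoc]
    exact (pvSeg_elim key.toList q hseg).symm

-- the suffix A slices off the matched prefix is B's partition tail
lemma pvDrop (L q : List Char) (hseg : pvSeg L = q ++ ['_']) :
    L.drop (q ++ ['_']).length = pvTail L := by
  conv_lhs => rw [pvSeg_elim L q hseg]
  rw [show q ++ '_' :: pvTail L = (q ++ ['_']) ++ pvTail L by simp]
  simp

-- one add() on a diagonal state stays diagonal: seen and result grow in lockstep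
lemma pvAddA_diag (s : List String) (v : String) :
    pvAddA (s, s) v =
      (if PySem.Str.lower (PySem.Str.strip v) = "" then (s, s)
       else (PySem.Set.add s (PySem.Str.lower (PySem.Str.strip v)),
             PySem.Set.add s (PySem.Str.lower (PySem.Str.strip v)))) := by
  simp only [pvAddA, PySem.Set.add, PySem.Set.contains]
  split_ifs with h1 h2 h3 h4 h5 <;> simp_all

-- a whole sequence of add()s is Set.update with the normalized non-empty values
lemma pvAddA_foldl (cs : List String) (s : List String) :
    cs.foldl pvAddA (s, s) =
      (PySem.Set.update s ((cs.map (fun c => PySem.Str.lower (PySem.Str.strip c))).filter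
          (fun v => decide (v ≠ ""))),
       PySem.Set.update s ((cs.map (fun c => PySem.Str.lower (PySem.Str.strip c))).filter
          (fun v => decide (v ≠ "")))) := by
  induction cs generalizing s with
  | nil => simp [PySem.Set.update]
  | cons c cs ih =>
    simp only [List.foldl_cons, pvAddA_diag, List.map_cons, List.filter_cons]
    by_cases h : PySem.Str.lower (PySem.Str.strip c) = ""
    · simp [h, ih]
    · simp [h, ih, PySem.Set.update_cons]

-- A's interleaved generation (nested folds of add) = add folded over one flat candidate list
lemma pvFold_flatten (l : List (String × List String)) (cond : String × List String → Bool)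
    (h : String × List String → List String) (cs : List String)
    (st0 : PySem.Set String × List String) :
    l.foldl (fun st pa => if cond pa then (h pa).foldl pvAddA st else st) (cs.foldl pvAddA st0)
      = (l.foldl (fun acc pa => if cond pa then acc ++ h pa else acc) cs).foldl pvAddA st0 := by
  induction l generalizing cs with
  | nil => rfl
  | cons pa l ih =>
    simp only [List.foldl_cons]
    by_cases hc : cond pa
    · simp only [hc, if_pos, ← List.foldl_append, ih]
    · simp [hc, ih]

-- A's startswith scan over the table produces exactly B's single-lookup alias block
lemma pvCandsEq (key : String) (init : List String) :
    pvPrefixAliases.foldl (fun cs pa =>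
        if PySem.Str.startswith key pa.1 then
          cs ++ pa.2.map (fun al => String.ofList (al.toList ++ key.toList.drop pa.1.toList.length))
        else cs) init
      = init ++ ((List.lookup (String.ofList (pvSeg key.toList)) pvPrefixAliases).getD []).map
          (fun al => String.ofList (al.toList ++ pvTail key.toList)) := by
  have e1 : ("faction_" : String).toList = "faction".toList ++ ['_'] := by decide
  have e2 : ("npcvoice_" : String).toList = "npcvoice".toList ++ ['_'] := by decide
  have e3 : ("npcdialog_" : String).toList = "npcdialog".toList ++ ['_'] := by decide
  have e4 : ("textdialog_" : String).toList = "textdialog".toList ++ ['_'] := by decide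
  have e5 : ("general_" : String).toList = "general".toList ++ ['_'] := by decide
  simp only [pvPrefixAliases, List.foldl_cons, List.foldl_nil]
  rw [pvStartswith_eq key "faction_" ("faction".toList) e1 (by decide),
      pvStartswith_eq key "npcvoice_" ("npcvoice".toList) e2 (by decide),
      pvStartswith_eq key "npcdialog_" ("npcdialog".toList) e3 (by decide),
      pvStartswith_eq key "textdialog_" ("textdialog".toList) e4 (by decide),
      pvStartswith_eq key "general_" ("general".toList) e5 (by decide)]
  by_cases h1 : pvSeg key.toList = "faction".toList ++ ['_']
  · have hd : key.toList.drop 8 = pvTail key.toList := by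
      rw [show (8 : Nat) = ("faction".toList ++ ['_']).length by decide]
      exact pvDrop key.toList _ h1
    simp [h1, List.lookup, hd]
  by_cases h2 : pvSeg key.toList = "npcvoice".toList ++ ['_']
  · have hd : key.toList.drop 9 = pvTail key.toList := by
      rw [show (9 : Nat) = ("npcvoice".toList ++ ['_']).length by decide]
      exact pvDrop key.toList _ h2
    simp [h2, List.lookup, hd]
  by_cases h3 : pvSeg key.toList = "npcdialog".toList ++ ['_']
  · have hd : key.toList.drop 10 = pvTail key.toList := by
      rw [show (10 : Nat) = ("npcdialog".toList ++ ['_']).length by decide]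
      exact pvDrop key.toList _ h3
    simp [h3, List.lookup, hd]
  by_cases h4 : pvSeg key.toList = "textdialog".toList ++ ['_']
  · have hd : key.toList.drop 11 = pvTail key.toList := by
      rw [show (11 : Nat) = ("textdialog".toList ++ ['_']).length by decide]
      exact pvDrop key.toList _ h4
    simp [h4, List.lookup, hd]
  by_cases h5 : pvSeg key.toList = "general".toList ++ ['_']
  · have hd : key.toList.drop 8 = pvTail key.toList := by
      rw [show (8 : Nat) = ("general".toList ++ ['_']).length by decide]
      exact pvDrop key.toList _ h5
    simp [h5, List.lookup, hd]
  · have k1 : (String.ofList (pvSeg key.toList) == ("faction_" : String)) = false := by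
      rw [beq_eq_false_iff_ne]; intro he
      exact h1 (by have := congrArg String.toList he; rw [String.toList_ofList, e1] at this; exact this)
    have k2 : (String.ofList (pvSeg key.toList) == ("npcvoice_" : String)) = false := by
      rw [beq_eq_false_iff_ne]; intro he
      exact h2 (by have := congrArg String.toList he; rw [String.toList_ofList, e2] at this; exact this)
    have k3 : (String.ofList (pvSeg key.toList) == ("npcdialog_" : String)) = false := by
      rw [beq_eq_false_iff_ne]; intro he
      exact h3 (by have := congrArg String.toList he; rw [String.toList_ofList, e3] at this; exact this)
    have k4 : (String.ofList (pvSeg key.toList) == ("textdialog_" : String)) = false := by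
      rw [beq_eq_false_iff_ne]; intro he
      exact h4 (by have := congrArg String.toList he; rw [String.toList_ofList, e4] at this; exact this)
    have k5 : (String.ofList (pvSeg key.toList) == ("general_" : String)) = false := by
      rw [beq_eq_false_iff_ne]; intro he
      exact h5 (by have := congrArg String.toList he; rw [String.toList_ofList, e5] at this; exact this)
    have h1' : ¬ pvSeg key.toList = ("faction_" : String).toList := by rw [e1]; exact h1
    have h2' : ¬ pvSeg key.toList = ("npcvoice_" : String).toList := by rw [e2]; exact h2
    have h3' : ¬ pvSeg key.toList = ("npcdialog_" : String).toList := by rw [e3]; exact h3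
    have h4' : ¬ pvSeg key.toList = ("textdialog_" : String).toList := by rw [e4]; exact h4
    have h5' : ¬ pvSeg key.toList = ("general_" : String).toList := by rw [e5]; exact h5
    have g1 : ¬ pvSeg key.toList = ['f','a','c','t','i','o','n','_'] := fun h => h1' (by rw [h]; decide)
    have g2 : ¬ pvSeg key.toList = ['n','p','c','v','o','i','c','e','_'] := fun h => h2' (by rw [h]; decide)
    have g3 : ¬ pvSeg key.toList = ['n','p','c','d','i','a','l','o','g','_'] := fun h => h3' (by rw [h]; decide)
    have g4 : ¬ pvSeg key.toList = ['t','e','x','t','d','i','a','l','o','g','_'] := fun h => h4' (by rw [h]; decide)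
    have g5 : ¬ pvSeg key.toList = ['g','e','n','e','r','a','l','_'] := fun h => h5' (by rw [h]; decide)
    simp [g1, g2, g3, g4, g5, List.lookup, k1, k2, k3, k4, k5]

-- the whole body (below the empty-key test), for an arbitrary key
theorem pv_core (key : String) :
    (pvPrefixAliases.foldl (fun st pa =>
        if PySem.Str.startswith key pa.1 then
          pa.2.foldl (fun st al => pvAddA st (String.ofList (al.toList ++ key.toList.drop pa.1.toList.length))) st
        else st) (pvAddA (pvAddA ([], []) key) (PySem.Str.replace key "__" "_"))).2
      = PySem.List.dedup
          ((([key, PySem.Str.replace key "__" "_"] ++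
              ((List.lookup (String.ofList (pvSeg key.toList)) pvPrefixAliases).getD []).map
                (fun al => String.ofList (al.toList ++ pvTail key.toList))).map
            (fun c => PySem.Str.lower (PySem.Str.strip c))).filter (fun v => decide (v ≠ ""))) := by
  have h1 : pvAddA (pvAddA ([], []) key) (PySem.Str.replace key "__" "_")
      = [key, PySem.Str.replace key "__" "_"].foldl pvAddA ([], []) := by
    simp only [List.foldl_cons, List.foldl_nil]
  have h3 : (pvPrefixAliases.foldl (fun st pa =>
        if PySem.Str.startswith key pa.1 then
          pa.2.foldl (fun st al => pvAddA st (String.ofList (al.toList ++ key.toList.drop pa.1.toList.length))) st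
        else st) (pvAddA (pvAddA ([], []) key) (PySem.Str.replace key "__" "_")))
      = (pvPrefixAliases.foldl (fun st pa =>
        if PySem.Str.startswith key pa.1 then
          (pa.2.map (fun al => String.ofList (al.toList ++ key.toList.drop pa.1.toList.length))).foldl pvAddA st
        else st) (pvAddA (pvAddA ([], []) key) (PySem.Str.replace key "__" "_"))) :=
    PySem.List.foldl_congr_mem _ _ _ _ (by
      intro acc pa _
      split
      · exact List.foldl_map.symm
      · rfl)
  rw [h3, h1, pvFold_flatten, pvCandsEq, pvAddA_foldl]
  simp [PySem.Set.update_nil_left, PySem.List.dedup_eq_ofList]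

theorem pv_main (paloc_key : String) :
    iter_paloc_key_candidates_py paloc_key = iter_paloc_key_candidates_py_alt paloc_key := by
  unfold iter_paloc_key_candidates_py iter_paloc_key_candidates_py_alt
  by_cases hk : PySem.Str.lower (PySem.Str.strip paloc_key) = ""
  · simp only [hk, if_pos]
  · simp only [hk, ite_false]
    exact pv_core (PySem.Str.lower (PySem.Str.strip paloc_key))

-- ===== VERDICT (by name: the statement is the Claim_ definition above) =====
theorem iter_paloc_key_candidates_py_spec : Claim_equal_iter_paloc_key_candidates_py := by
  intro paloc_key _
  unfold Spec_iter_paloc_key_candidates_py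
  exact pv_main paloc_key
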